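-- pv_equiv track=rewrite | github.com/RangaMokshagna/news-headline-simplifier | nlp/syntax_analysis.py | dependency_features
-- ===== SOURCE A (Python) =====
-- def dependency_features(pos_tags: list) -> list:
--     """
--     Approximate dependency roles using POS patterns.
--     Returns a list of (word, role) pairs for display.
--     """
--     result = []
--     tags_list = list(pos_tags)
--     prev_tag = None
--
--     for i, (word, tag) in enumerate(tags_list):
--         if tag in ("NNP", "NNPS"):
--             role = "Named Entity / Subject"
--         elif tag in ("NN", "NNS") and i == 0:
--             role = "Subject"
--         elif tag in ("NN", "NNS"):
--             role = "Object / Noun"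
--         elif tag.startswith("VB"):
--             role = "Predicate (Verb)"
--         elif tag.startswith("JJ"):
--             role = "Modifier (Adjective)"
--         elif tag.startswith("RB"):
--             role = "Modifier (Adverb)"
--         elif tag == "IN":
--             role = "Relation (Preposition)"
--         elif tag == "DT":
--             role = "Determiner"
--         elif tag == "CD":
--             role = "Quantity"
--         elif tag == "MD":
--             role = "Modal Auxiliary"
--         elif tag == "CC":
--             role = "Coordinator"
--         else:
--             role = tag
--         result.append((word, tag, role))
--         prev_tag = tag
--
--     return result
-- ===== SOURCE B (Python) =====
-- # B: declarative rule table interpreted by a generic matcher, plus a separate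
-- # head fix-up pass for the position-0 Subject case (instead of A's inline cascade).
-- _RULES = [
--     (("NNP", "NNPS"), False, "Named Entity / Subject"),
--     (("NN", "NNS"), False, "Object / Noun"),
--     (("VB",), True, "Predicate (Verb)"),
--     (("JJ",), True, "Modifier (Adjective)"),
--     (("RB",), True, "Modifier (Adverb)"),
--     (("IN",), False, "Relation (Preposition)"),
--     (("DT",), False, "Determiner"),
--     (("CD",), False, "Quantity"),
--     (("MD",), False, "Modal Auxiliary"),
--     (("CC",), False, "Coordinator"),
-- ]
--
--
-- def _role(tag):
--     for pats, is_prefix, label in _RULES: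
--         if any(tag.startswith(p) if is_prefix else tag == p for p in pats):
--             return label
--     return tag
--
--
-- def dependency_features(pos_tags: list) -> list:
--     out = [(w, t, _role(t)) for w, t in pos_tags]
--     if out and out[0][1] in ("NN", "NNS"):
--         w, t, _ = out[0]
--         out[0] = (w, t, "Subject")
--     return out
-- ===== Notes on version B (the rewrite author's own statement) =====
-- stated objective: idiomatic
-- what changed: Replaces A's hard-coded 12-branch if/elif cascade with a declarative rule table (patterns, prefix-flag, label) interpreted by a generic first-match scanner, and hoists the position-0 Subject case out of the loop into a separate head fix-up pass over the already-built output.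
import Mathlib
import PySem

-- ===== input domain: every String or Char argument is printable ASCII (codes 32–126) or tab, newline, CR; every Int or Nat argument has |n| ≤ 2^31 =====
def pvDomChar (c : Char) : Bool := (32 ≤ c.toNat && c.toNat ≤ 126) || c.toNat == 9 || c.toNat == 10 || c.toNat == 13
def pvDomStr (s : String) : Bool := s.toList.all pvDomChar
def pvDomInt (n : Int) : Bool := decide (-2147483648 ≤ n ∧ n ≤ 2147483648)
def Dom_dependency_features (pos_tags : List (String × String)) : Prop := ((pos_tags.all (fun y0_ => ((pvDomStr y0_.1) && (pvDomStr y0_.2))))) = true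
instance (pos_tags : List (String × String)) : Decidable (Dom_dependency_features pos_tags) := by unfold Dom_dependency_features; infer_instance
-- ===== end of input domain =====

-- B replaces A's inline if/elif cascade by a declarative rule table interpreted by a generic matcher, with the position-0 Subject case done as a separate head fix-up pass (idiomatic; same cost).


-- ===== PORT A =====
-- role of one (i, word, tag) entry: A's if/elif cascade, in order
def pvRoleA (i : Int) (tag : String) : String :=
  if tag = "NNP" ∨ tag = "NNPS" then "Named Entity / Subject"
  else if (tag = "NN" ∨ tag = "NNS") ∧ i = 0 then "Subject"
  else if tag = "NN" ∨ tag = "NNS" then "Object / Noun"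
  else if PySem.Str.startswith tag "VB" then "Predicate (Verb)"
  else if PySem.Str.startswith tag "JJ" then "Modifier (Adjective)"
  else if PySem.Str.startswith tag "RB" then "Modifier (Adverb)"
  else if tag = "IN" then "Relation (Preposition)"
  else if tag = "DT" then "Determiner"
  else if tag = "CD" then "Quantity"
  else if tag = "MD" then "Modal Auxiliary"
  else if tag = "CC" then "Coordinator"
  else tag

-- the loop: result is appended to, prev_tag tracked (as in A; it is never read)
def dependency_features (pos_tags : List (String × String)) : List (String × String × String) :=
  let tags_list := pos_tags
  ((PySem.List.enumerate tags_list).foldl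
    (fun (st : List (String × String × String) × Option String) iwt =>
      (st.1 ++ [(iwt.2.1, iwt.2.2, pvRoleA iwt.1 iwt.2.2)], some iwt.2.2))
    ([], none)).1

-- ===== PORT B =====
-- the declarative rule table: (patterns, is_prefix, label)
def pvRules : List (List String × Bool × String) :=
  [(["NNP", "NNPS"], false, "Named Entity / Subject"),
   (["NN", "NNS"], false, "Object / Noun"),
   (["VB"], true, "Predicate (Verb)"),
   (["JJ"], true, "Modifier (Adjective)"),
   (["RB"], true, "Modifier (Adverb)"),
   (["IN"], false, "Relation (Preposition)"),
   (["DT"], false, "Determiner"),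
   (["CD"], false, "Quantity"),
   (["MD"], false, "Modal Auxiliary"),
   (["CC"], false, "Coordinator")]

-- _role: generic scan of the rule table, first matching rule wins; default = tag itself
def pvScanRules (tag : String) : List (List String × Bool × String) → String
  | [] => tag
  | (pats, isPrefix, label) :: rest =>
      if pats.any (fun p => if isPrefix then PySem.Str.startswith tag p else tag == p)
      then label else pvScanRules tag rest

def pvRoleB (tag : String) : String := pvScanRules tag pvRules

-- map pass, then the head fix-up (Python mutates out[0]; ported as rebuilding the head)
def dependency_features_alt (pos_tags : List (String × String)) : List (String × String × String) :=
  let out := pos_tags.map (fun wt => (wt.1, wt.2, pvRoleB wt.2))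
  match out with
  | (w, t, _) :: rest => if t = "NN" ∨ t = "NNS" then (w, t, "Subject") :: rest else out
  | [] => out

-- ===== PRECONDITION & SPEC =====
def Spec_dependency_features (pos_tags : List (String × String)) (out : List (String × String × String)) : Prop := out = dependency_features_alt pos_tags
instance (pos_tags : List (String × String)) (out : List (String × String × String)) : Decidable (Spec_dependency_features pos_tags out) := by unfold Spec_dependency_features; infer_instance

-- ===== CLAIM =====
def Claim_equal_dependency_features : Prop := ∀ (pos_tags : List (String × String)), Dom_dependency_features pos_tags → Spec_dependency_features pos_tags (dependency_features pos_tags)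

-- ===== LEMMAS AND PROOFS =====

-- A's cascade splits into the position test plus B's position-free rule scan
lemma pv_roleA_split (i : Int) (tag : String) :
    pvRoleA i tag = if i = 0 ∧ (tag = "NN" ∨ tag = "NNS") then "Subject" else pvRoleB tag := by
  simp only [pvRoleB, pvRules, pvScanRules, List.any_cons, List.any_nil, pvRoleA]
  by_cases h1 : tag = "NNP" <;> by_cases h2 : tag = "NNPS" <;>
    by_cases h3 : tag = "NN" <;> by_cases h4 : tag = "NNS" <;>
    first
      | (simp_all; split_ifs <;> simp_all)
      | simp_all

-- A's fold over enumerate with start s ≥ 1 is B's plain role map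
lemma pv_map_tail (xs : List (String × String)) : ∀ (s : Int), 1 ≤ s →
    (PySem.List.enumerate xs s).map (fun iwt => (iwt.2.1, iwt.2.2, pvRoleA iwt.1 iwt.2.2))
      = xs.map (fun wt => (wt.1, wt.2, pvRoleB wt.2)) := by
  induction xs with
  | nil => intro s _; simp [PySem.List.enumerate_nil]
  | cons x t ih =>
    intro s hs
    rw [PySem.List.enumerate_cons, List.map_cons, List.map_cons, ih (s + 1) (by omega),
      pv_roleA_split]
    have : ¬ s = 0 := by omega
    simp [this]

-- A's fold accumulates exactly the role map of the enumeration
lemma pv_fold (xs : List (String × String)) : ∀ (s : Int) (acc : List (String × String × String)) (p : Option String),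
    ((PySem.List.enumerate xs s).foldl
      (fun (st : List (String × String × String) × Option String) iwt =>
        (st.1 ++ [(iwt.2.1, iwt.2.2, pvRoleA iwt.1 iwt.2.2)], some iwt.2.2)) (acc, p)).1
    = acc ++ (PySem.List.enumerate xs s).map (fun iwt => (iwt.2.1, iwt.2.2, pvRoleA iwt.1 iwt.2.2)) := by
  induction xs with
  | nil => intro s acc p; simp [PySem.List.enumerate_nil]
  | cons x t ih =>
    intro s acc p
    rw [PySem.List.enumerate_cons, List.foldl_cons, ih]
    simp

-- ===== VERDICT =====
theorem dependency_features_spec : Claim_equal_dependency_features := by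
  intro pos_tags _
  unfold Spec_dependency_features dependency_features dependency_features_alt
  rw [pv_fold]
  cases pos_tags with
  | nil => simp [PySem.List.enumerate_nil]
  | cons x t =>
    have h01 : (0 : Int) + 1 = 1 := rfl
    rw [PySem.List.enumerate_cons, List.map_cons, h01,
      pv_map_tail t 1 (by omega), pv_roleA_split]
    by_cases h : x.2 = "NN" ∨ x.2 = "NNS" <;> simp [h]
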